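-- pv_equiv track=rewrite | github.com/ethereum-optimism/op-analytics | helper_functions/duneapi_utils.py | generate_chunk_ranges
-- ===== SOURCE A (Python) =====
-- from typing import Callable, List, Tuple, Optional, Any
--
-- def generate_chunk_ranges(
--     trailing_days: int,
--     chunk_size: int,
--     ending_days: int = 0
-- ) -> List[Tuple[int, int]]:
--     """
--     Generate a list of (days_start, days_end) tuples for chunked date ranges.
--
--     Args:
--         trailing_days: Total number of days to cover (e.g., 28)
--         chunk_size: Size of each chunk in days (e.g., 3)
--         ending_days: Offset from today to stop at (default 0 = today)
--
--     Returns: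
--         List of (days_start, days_end) tuples, e.g., [(25, 28), (22, 25), ...]
--     """
--     chunk_ranges = []
--     current_end = trailing_days
--     while current_end > ending_days:
--         days_start = max(current_end - chunk_size, ending_days)
--         chunk_ranges.append((days_start, current_end))
--         current_end = days_start
--     return chunk_ranges
-- ===== SOURCE B (Python) =====
-- def generate_chunk_ranges(trailing_days, chunk_size, ending_days=0):
--     """Chunked (start, end) day ranges via closed-form boundary cuts.
--
--     Computes the number of full chunks and the remainder with divmod, builds
--     the ascending list of day boundaries (the partial chunk, if any, sits at
--     the bottom), pairs consecutive boundaries, and reverses.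
--     """
--     total = trailing_days - ending_days
--     if total <= 0:
--         return []
--     full_chunks, remainder = divmod(total, chunk_size)
--     cuts = [ending_days]
--     if remainder:
--         cuts.append(ending_days + remainder)
--     base = ending_days + remainder
--     cuts.extend(base + chunk_size * (i + 1) for i in range(full_chunks))
--     pairs = list(zip(cuts, cuts[1:]))
--     pairs.reverse()
--     return pairs
-- ===== Notes on version B (the rewrite author's own statement) =====
-- stated objective: alternative
-- what changed: Replaces the stateful top-down while loop (each start fed back as the next end, with a max clamp) by a closed-form construction: divmod gives the chunk count and remainder, an ascending boundary list is built bottom-up, consecutive boundaries are zipped into pairs, and the result is reversed; no accumulator and no max.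
import Mathlib
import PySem

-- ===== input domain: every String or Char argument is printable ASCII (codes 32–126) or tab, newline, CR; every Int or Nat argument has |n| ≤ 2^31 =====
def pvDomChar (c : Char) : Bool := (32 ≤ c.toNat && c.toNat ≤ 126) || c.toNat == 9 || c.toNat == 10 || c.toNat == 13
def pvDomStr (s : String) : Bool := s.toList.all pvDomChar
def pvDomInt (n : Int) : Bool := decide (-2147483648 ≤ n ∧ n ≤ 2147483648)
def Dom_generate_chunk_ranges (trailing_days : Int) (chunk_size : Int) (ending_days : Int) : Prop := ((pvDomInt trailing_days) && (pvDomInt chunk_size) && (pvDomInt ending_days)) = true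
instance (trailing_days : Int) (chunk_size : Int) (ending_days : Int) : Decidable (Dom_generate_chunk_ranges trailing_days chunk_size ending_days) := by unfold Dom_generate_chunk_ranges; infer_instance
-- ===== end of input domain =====

-- B replaces A's stateful top-down while loop by a closed-form construction
-- (divmod, ascending boundary cuts, zip of consecutive cuts, reverse);
-- equivalence is claimed on the inputs where A terminates (Pre_ below).

-- ===== PORT A =====
-- the while loop, with a fuel bound only as a totality guard (inside Pre_ the loop
-- makes at most (trailing_days - ending_days).toNat iterations)
def chunkLoop (fuel : Nat) (current_end chunk_size ending_days : Int) : List (Int × Int) :=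
  match fuel with
  | 0 => []
  | Nat.succ fuel =>
    if ending_days < current_end then
      let days_start := max (current_end - chunk_size) ending_days
      (days_start, current_end) :: chunkLoop fuel days_start chunk_size ending_days
    else []

def generate_chunk_ranges (trailing_days : Int) (chunk_size : Int) (ending_days : Int) : List (Int × Int) :=
  chunkLoop (trailing_days - ending_days).toNat trailing_days chunk_size ending_days

-- ===== PORT B =====
def generate_chunk_ranges_alt (trailing_days : Int) (chunk_size : Int) (ending_days : Int) : List (Int × Int) :=
  let total := trailing_days - ending_days
  if total ≤ 0 then []
  else
    match PySem.Int.divmod? total chunk_size with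
    | none => []  -- divmod by zero: Python raises ZeroDivisionError here; outside Pre_
    | some (full_chunks, remainder) =>
      let base := ending_days + remainder
      let cuts := [ending_days]
        ++ (if remainder ≠ 0 then [base] else [])
        ++ (PySem.List.pyRange 0 full_chunks 1).map (fun i => base + chunk_size * (i + 1))
      (cuts.zip cuts.tail).reverse

-- ===== PRECONDITION & SPEC =====
-- Pre_ excludes only the inputs where A never returns: with trailing_days > ending_days
-- and chunk_size ≤ 0 the while loop runs forever.
def Pre_generate_chunk_ranges (trailing_days : Int) (chunk_size : Int) (ending_days : Int) : Prop :=
  trailing_days ≤ ending_days ∨ 0 < chunk_size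
instance (trailing_days : Int) (chunk_size : Int) (ending_days : Int) : Decidable (Pre_generate_chunk_ranges trailing_days chunk_size ending_days) := by unfold Pre_generate_chunk_ranges; infer_instance

def pvWitness_generate_chunk_ranges : Int × Int × Int := (28, 3, 0)

def Spec_generate_chunk_ranges (trailing_days : Int) (chunk_size : Int) (ending_days : Int) (out : List (Int × Int)) : Prop := out = generate_chunk_ranges_alt trailing_days chunk_size ending_days
instance (trailing_days : Int) (chunk_size : Int) (ending_days : Int) (out : List (Int × Int)) : Decidable (Spec_generate_chunk_ranges trailing_days chunk_size ending_days out) := by unfold Spec_generate_chunk_ranges; infer_instance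

-- ===== CLAIM (what is proved, stated in full; the proofs are below) =====
def Claim_equal_generate_chunk_ranges : Prop := ∀ (trailing_days : Int) (chunk_size : Int) (ending_days : Int), Dom_generate_chunk_ranges trailing_days chunk_size ending_days → Pre_generate_chunk_ranges trailing_days chunk_size ending_days → Spec_generate_chunk_ranges trailing_days chunk_size ending_days (generate_chunk_ranges trailing_days chunk_size ending_days)

-- ===== LEMMAS AND PROOFS =====

-- descending list of the q full chunks above base b: [(b+(q-1)c, b+qc), …, (b, b+c)]
def descChunks (q : Nat) (b c : Int) : List (Int × Int) :=
  match q with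
  | 0 => []
  | Nat.succ q => (b + q * c, b + (q + 1) * c) :: descChunks q b c

-- ascending version: [(b, b+c), (b+c, b+2c), …]
def ascChunks (q : Nat) (b c : Int) : List (Int × Int) :=
  match q with
  | 0 => []
  | Nat.succ q => (b, b + c) :: ascChunks q (b + c) c

lemma ascChunks_snoc (q : Nat) (b c : Int) :
    ascChunks (q + 1) b c = ascChunks q b c ++ [(b + q * c, b + (q + 1) * c)] := by
  induction q generalizing b with
  | zero => simp [ascChunks]
  | succ q ih =>
    have h1 : ascChunks (q + 1 + 1) b c = (b, b + c) :: ascChunks (q + 1) (b + c) c := rfl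
    have h2 : ascChunks (q + 1) b c = (b, b + c) :: ascChunks q (b + c) c := rfl
    rw [h1, ih (b + c), h2, List.cons_append]
    congr 3 <;> push_cast <;> ring

lemma descChunks_reverse (q : Nat) (b c : Int) :
    (descChunks q b c).reverse = ascChunks q b c := by
  induction q with
  | zero => rfl
  | succ q ih => rw [descChunks, List.reverse_cons, ih, ← ascChunks_snoc]

lemma ascChunks_reverse (q : Nat) (b c : Int) :
    (ascChunks q b c).reverse = descChunks q b c := by
  rw [← descChunks_reverse, List.reverse_reverse]

-- A-side characterisation -----------------------------------------------------

lemma chunkLoop_stop (n : Nat) (cur c e : Int) (h : cur ≤ e) :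
    chunkLoop n cur c e = [] := by
  cases n with
  | zero => rfl
  | succ n => simp only [chunkLoop]; rw [if_neg (by omega)]

-- inside Pre_, A's loop from b + q*c (e ≤ b < e + c) yields the q full chunks
-- above b, then (if e < b) the partial chunk (e, b)
lemma chunkLoop_eq (c e : Int) (hc : 0 < c) :
    ∀ (q : Nat) (b : Int), e ≤ b → b < e + c → ∀ (n : Nat), (b + q * c - e).toNat ≤ n →
      chunkLoop n (b + q * c) c e =
        descChunks q b c ++ (if e < b then [(e, b)] else []) := by
  intro q
  induction q with
  | zero =>
    intro b hb1 hb2 n hn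
    simp only [descChunks, List.nil_append, Nat.cast_zero, zero_mul, add_zero]
    by_cases h : e < b
    · rw [if_pos h]
      cases n with
      | zero => simp only [Nat.cast_zero, zero_mul, add_zero] at hn; omega
      | succ n =>
        simp only [chunkLoop]
        rw [if_pos h]
        have hmax : max (b - c) e = e := by omega
        rw [hmax, chunkLoop_stop n e c e le_rfl]
    · rw [if_neg h, chunkLoop_stop n b c e (by omega)]
  | succ q ih =>
    intro b hb1 hb2 n hn
    have hnn : (0:Int) ≤ (q:Int) * c := by positivity
    have key : b + ((q + 1 : Nat) : Int) * c = (b + (q : Int) * c) + c := by push_cast; ring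
    have hpos : e < b + ((q + 1 : Nat) : Int) * c := by rw [key]; linarith
    cases n with
    | zero =>
      exfalso
      rw [key] at hn
      simp only [Nat.le_zero, Int.toNat_eq_zero] at hn
      linarith
    | succ n =>
      simp only [chunkLoop]
      rw [if_pos hpos]
      have hmax : max (b + ((q + 1 : Nat) : Int) * c - c) e = b + (q : Int) * c := by
        rw [key]
        have : b + (q : Int) * c + c - c = b + (q : Int) * c := by ring
        rw [this]
        exact max_eq_left (by linarith)
      have hfuel : (b + (q : Int) * c - e).toNat ≤ n := by
        rw [key] at hn
        omega
      rw [hmax, ih b hb1 hb2 n hfuel]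
      simp only [descChunks, List.cons_append]
      congr 2 <;> push_cast <;> ring

-- B-side characterisation -----------------------------------------------------

lemma map_shift (c b : Int) (q : Nat) :
    (PySem.List.pyRange 1 ((q : Int) + 1) 1).map (fun i => b + c * (i + 1))
      = (PySem.List.pyRange 0 (q : Int) 1).map (fun i => (b + c) + c * (i + 1)) := by
  rw [PySem.List.pyRange_one, PySem.List.pyRange_one]
  simp only [List.map_map]
  have h : ((q : Int) + 1 - 1).toNat = ((q : Int) - 0).toNat := by omega
  rw [h]
  apply List.map_congr_left
  intro k _
  simp only [Function.comp_apply]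
  ring

-- zipping consecutive elements of the cut list b, b+c, b+2c, … gives ascChunks
lemma zip_cuts (c : Int) (q : Nat) (b : Int) :
    ((b :: (PySem.List.pyRange 0 (q : Int) 1).map (fun i => b + c * (i + 1))).zip
      ((PySem.List.pyRange 0 (q : Int) 1).map (fun i => b + c * (i + 1)))) = ascChunks q b c := by
  induction q generalizing b with
  | zero => simp [PySem.List.pyRange_one_eq_nil, ascChunks]
  | succ q ih =>
    have hcast : ((q + 1 : Nat) : Int) = (q : Int) + 1 := by push_cast; ring
    have hcons : PySem.List.pyRange 0 ((q : Int) + 1) 1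
        = 0 :: PySem.List.pyRange 1 ((q : Int) + 1) 1 := by
      have := PySem.List.pyRange_one_cons (a := 0) (b := (q : Int) + 1) (by positivity)
      simpa using this
    rw [hcast, hcons, List.map_cons, map_shift c b q]
    have hb : b + c * (0 + 1) = b + c := by ring
    rw [hb, List.zip_cons_cons, ih (b + c)]
    rfl

-- ===== VERDICT (by name: the statement is the Claim_ definition above) =====
theorem generate_chunk_ranges_spec : Claim_equal_generate_chunk_ranges := by
  intro t c e _ pre
  unfold Spec_generate_chunk_ranges generate_chunk_ranges generate_chunk_ranges_alt
  by_cases hle : t - e ≤ 0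
  · rw [if_pos hle, chunkLoop_stop _ t c e (by omega)]
  · have hc : 0 < c := pre.resolve_left (by omega)
    rw [if_neg hle]
    have hdm : PySem.Int.divmod? (t - e) c = some ((t - e) / c, (t - e) % c) := by
      have h1 : (t - e).fdiv c = (t - e) / c := by rw [Int.fdiv_eq_ediv]; omega
      have h2 : (t - e).fmod c = (t - e) % c := by rw [Int.fmod_eq_emod]; omega
      simp [PySem.Int.divmod?, h1, h2]; omega
    rw [hdm]
    dsimp only
    have hr0 : 0 ≤ (t - e) % c := Int.emod_nonneg _ (by omega)
    have hrc : (t - e) % c < c := Int.emod_lt_of_pos _ hc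
    have hq0 : 0 ≤ (t - e) / c := Int.ediv_nonneg (by omega) hc.le
    have hsum : ((t - e) / c) * c + (t - e) % c = t - e := by
      have := Int.ediv_add_emod (t - e) c
      linarith
    set r := (t - e) % c with hrdef
    set qI := (t - e) / c with hqdef
    have hqI : ((qI.toNat : Int)) = qI := Int.toNat_of_nonneg hq0
    by_cases hr00 : r = 0
    · -- no partial chunk
      have ht : t = e + (qI.toNat : Int) * c := by rw [hqI]; linarith
      rw [if_neg (by simp [hr00])]
      simp only [hr00, add_zero, List.singleton_append, List.nil_append, List.tail_cons]
      rw [← hqI, zip_cuts c qI.toNat e, ascChunks_reverse]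
      rw [ht]
      have := chunkLoop_eq c e hc qI.toNat e le_rfl (by linarith)
        (e + (qI.toNat : Int) * c - e).toNat le_rfl
      rw [this, if_neg (lt_irrefl e), List.append_nil]
    · -- partial chunk (e, e + r) at the bottom
      have ht : t = (e + r) + (qI.toNat : Int) * c := by rw [hqI]; linarith
      rw [if_pos hr00]
      simp only [List.singleton_append, List.cons_append, List.nil_append, List.tail_cons]
      rw [← hqI, List.zip_cons_cons, zip_cuts c qI.toNat (e + r), List.reverse_cons,
        ascChunks_reverse]
      rw [ht]
      have := chunkLoop_eq c e hc qI.toNat (e + r) (by linarith) (by linarith)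
        ((e + r) + (qI.toNat : Int) * c - e).toNat le_rfl
      rw [this, if_pos (by omega)]
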